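-- pv_equiv track=rewrite | github.com/president-xd/Writeups | HTB/Challenges/Crypto/noncesense_encryption/solve.py | forward_gen_key
-- ===== SOURCE A (Python) =====
-- def forward_gen_key(base_key):
--     """Reproduce __gen_key to verify recovery"""
--     kh = base_key >> 25
--     kl = base_key & 0x1ffffff
--     tmp = []
--     for __ in range(10):
--         for _ in range(25):
--             kh, kl = kl, kh ^ kl
--         tmp.append(kh << 25 | kl)
--     new_key = 0
--     for i in range(10):
--         new_key = (new_key << 50) | tmp[i]
--     return new_key
-- ===== SOURCE B (Python) =====
-- def _matpow2(n):
--     """[[0,1],[1,1]]^n over GF(2), returned as (a, b, c, d) with entries in {0,1},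
--     computed by square-and-multiply with XOR/AND arithmetic."""
--     a, b, c, d = 1, 0, 0, 1          # identity matrix
--     x, y, z, w = 0, 1, 1, 1          # the step matrix M
--     while n > 0:
--         if n & 1:
--             a, b, c, d = ((a & x) ^ (b & z), (a & y) ^ (b & w),
--                           (c & x) ^ (d & z), (c & y) ^ (d & w))
--         x, y, z, w = ((x & x) ^ (y & z), (x & y) ^ (y & w),
--                       (z & x) ^ (w & z), (z & y) ^ (w & w))
--         n >>= 1
--     return a, b, c, d
--
--
-- def forward_gen_key(base_key):
--     """Each round's repeated register steps form a power of the transition matrix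
--     over GF(2) acting bitwise on (kh, kl); apply that precomputed matrix once
--     per round and pack new_key on the fly."""
--     kh = base_key >> 25
--     kl = base_key & 0x1ffffff
--     a, b, c, d = _matpow2(25)
--     new_key = 0
--     for _ in range(10):
--         kh, kl = ((kh if a else 0) ^ (kl if b else 0),
--                   (kh if c else 0) ^ (kl if d else 0))
--         new_key = (new_key << 50) | (kh << 25 | kl)
--     return new_key
-- ===== Notes on version B (the rewrite author's own statement) =====
-- stated objective: alternative
-- what changed: B replaces A's repeated-XOR recurrence inside each round by a single application of the GF(2) Fibonacci transition matrix raised to the round's step count (computed once by square-and-multiply with XOR/AND arithmetic), and packs each round's word into new_key on the fly instead of collecting a tmp list and re-indexing it in a second loop.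
import Mathlib
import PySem

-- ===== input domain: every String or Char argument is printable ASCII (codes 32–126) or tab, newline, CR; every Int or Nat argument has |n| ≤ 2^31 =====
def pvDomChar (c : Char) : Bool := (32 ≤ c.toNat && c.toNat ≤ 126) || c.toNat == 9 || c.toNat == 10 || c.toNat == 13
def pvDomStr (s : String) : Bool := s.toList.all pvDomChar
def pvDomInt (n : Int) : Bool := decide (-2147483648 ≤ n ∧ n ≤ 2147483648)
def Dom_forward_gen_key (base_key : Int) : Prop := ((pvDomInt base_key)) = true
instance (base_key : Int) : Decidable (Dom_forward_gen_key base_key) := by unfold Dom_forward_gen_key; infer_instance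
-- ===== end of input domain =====

-- B replaces A's per-round repeated XOR recurrence by one application of the GF(2)
-- Fibonacci transition matrix raised to the step count (square-and-multiply) and
-- packs rounds on the fly, dropping A's tmp list; objective: alternative.

-- ===== PORT A =====
-- the inner-loop register step: kh, kl = kl, kh ^ kl
def pvStepA (p : Int × Int) (_ : Int) : Int × Int :=
  (p.2, PySem.Int.bxor p.1 p.2)

-- one round of A's outer loop: run the inner loop, append kh << 25 | kl to tmp
def pvRoundA (s : Int × Int × List Int) (_ : Int) : Int × Int × List Int :=
  let p := (PySem.List.pyRange 0 25 1).foldl pvStepA (s.1, s.2.1)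
  (p.1, p.2, s.2.2 ++ [PySem.Int.bor (p.1 <<< 25) p.2])

def forward_gen_key (base_key : Int) : Int :=
  let kh := base_key >>> 25
  let kl := PySem.Int.band base_key 0x1ffffff
  let s := (PySem.List.pyRange 0 10 1).foldl pvRoundA (kh, kl, [])
  (PySem.List.pyRange 0 10 1).foldl
    (fun nk i => PySem.Int.bor (nk <<< 50) (PySem.List.pyGetD s.2.2 i 0)) 0

-- ===== PORT B =====
-- square-and-multiply for [[0,1],[1,1]]^n over GF(2); acc is the accumulator, m the
-- running square; the fuel argument (= n at the call site) only makes the Python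
-- 'while n > 0' loop structural — it never runs out since n halves each pass
def pvMatpowGo : Nat → Nat → (Int × Int × Int × Int) → (Int × Int × Int × Int) → Int × Int × Int × Int
  | 0, _, acc, _ => acc
  | fuel + 1, n, acc, m =>
    if n = 0 then acc
    else
      let acc' :=
        if n &&& 1 = 1 then
          (PySem.Int.bxor (PySem.Int.band acc.1 m.1) (PySem.Int.band acc.2.1 m.2.2.1),
           PySem.Int.bxor (PySem.Int.band acc.1 m.2.1) (PySem.Int.band acc.2.1 m.2.2.2),
           PySem.Int.bxor (PySem.Int.band acc.2.2.1 m.1) (PySem.Int.band acc.2.2.2 m.2.2.1),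
           PySem.Int.bxor (PySem.Int.band acc.2.2.1 m.2.1) (PySem.Int.band acc.2.2.2 m.2.2.2))
        else acc
      pvMatpowGo fuel (n >>> 1) acc'
        (PySem.Int.bxor (PySem.Int.band m.1 m.1) (PySem.Int.band m.2.1 m.2.2.1),
         PySem.Int.bxor (PySem.Int.band m.1 m.2.1) (PySem.Int.band m.2.1 m.2.2.2),
         PySem.Int.bxor (PySem.Int.band m.2.2.1 m.1) (PySem.Int.band m.2.2.2 m.2.2.1),
         PySem.Int.bxor (PySem.Int.band m.2.2.1 m.2.1) (PySem.Int.band m.2.2.2 m.2.2.2))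

-- one round of B: apply the matrix coefficients (Python truthiness: x if c else 0),
-- then fold the packed word into new_key immediately
def pvRoundB (a b c d : Int) (s : Int × Int × Int) (_ : Int) : Int × Int × Int :=
  let kh' := PySem.Int.bxor (if a ≠ 0 then s.1 else 0) (if b ≠ 0 then s.2.1 else 0)
  let kl' := PySem.Int.bxor (if c ≠ 0 then s.1 else 0) (if d ≠ 0 then s.2.1 else 0)
  (kh', kl', PySem.Int.bor (s.2.2 <<< 50) (PySem.Int.bor (kh' <<< 25) kl'))

def forward_gen_key_alt (base_key : Int) : Int :=
  let kh := base_key >>> 25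
  let kl := PySem.Int.band base_key 0x1ffffff
  let m := pvMatpowGo 25 25 (1, 0, 0, 1) (0, 1, 1, 1)
  ((PySem.List.pyRange 0 10 1).foldl (pvRoundB m.1 m.2.1 m.2.2.1 m.2.2.2) (kh, kl, 0)).2.2

-- ===== PRECONDITION & SPEC =====
def Spec_forward_gen_key (base_key : Int) (out : Int) : Prop := out = forward_gen_key_alt base_key
instance (base_key : Int) (out : Int) : Decidable (Spec_forward_gen_key base_key out) := by unfold Spec_forward_gen_key; infer_instance

-- ===== CLAIM (what is proved, stated in full; the proofs are below) =====
def Claim_equal_forward_gen_key : Prop := ∀ (base_key : Int), Dom_forward_gen_key base_key → Spec_forward_gen_key base_key (forward_gen_key base_key)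

-- ===== LEMMAS AND PROOFS =====

theorem pvBxorCancel (a b : Int) : PySem.Int.bxor b (PySem.Int.bxor a b) = a := by
  have hx : ∀ m n : Nat, n ^^^ (m ^^^ n) = m := by
    intro m n; rw [Nat.xor_comm m n, ← Nat.xor_assoc, Nat.xor_self, Nat.zero_xor]
  unfold PySem.Int.bxor
  split_ifs with h1 h2 h3 h4 h5 h6 h7 <;> simp_all <;> omega

theorem pvBxorCancel' (a b : Int) : PySem.Int.bxor (PySem.Int.bxor a b) a = b := by
  rw [PySem.Int.bxor_comm, PySem.Int.bxor_comm a b, pvBxorCancel]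

theorem pvMatVal : pvMatpowGo 25 25 (1, 0, 0, 1) (0, 1, 1, 1) = (0, 1, 1, 1) := by decide

theorem pvStep25 (kh kl : Int) :
    (PySem.List.pyRange 0 25 1).foldl pvStepA (kh, kl) = (kl, PySem.Int.bxor kh kl) := by
  have h : PySem.List.pyRange 0 25 1 =
      [0,1,2,3,4,5,6,7,8,9,10,11,12,13,14,15,16,17,18,19,20,21,22,23,24] := by decide
  simp [h, pvStepA, pvBxorCancel, pvBxorCancel']

theorem pvRoundB0111 (s : Int × Int × Int) (e : Int) :
    pvRoundB 0 1 1 1 s e =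
      (s.2.1, PySem.Int.bxor s.1 s.2.1,
       PySem.Int.bor (s.2.2 <<< 50)
         (PySem.Int.bor (s.2.1 <<< 25) (PySem.Int.bxor s.1 s.2.1))) := by
  simp [pvRoundB, PySem.Int.bxor_comm 0, PySem.Int.bxor_zero]

theorem pvRoundA_eq (kh kl : Int) (tmp : List Int) (e : Int) :
    pvRoundA (kh, kl, tmp) e =
      (kl, PySem.Int.bxor kh kl,
       tmp ++ [PySem.Int.bor (kl <<< 25) (PySem.Int.bxor kh kl)]) := by
  simp [pvRoundA, pvStep25]

theorem pvTmpPrefix (L : List Int) (kh kl : Int) (tmp : List Int) :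
    L.foldl pvRoundA (kh, kl, tmp) =
      ((L.foldl pvRoundA (kh, kl, [])).1,
       (L.foldl pvRoundA (kh, kl, [])).2.1,
       tmp ++ (L.foldl pvRoundA (kh, kl, [])).2.2) := by
  induction L generalizing kh kl tmp with
  | nil => simp
  | cons e L ih =>
    simp only [List.foldl_cons, pvRoundA_eq, List.nil_append]
    rw [ih kl (PySem.Int.bxor kh kl) (tmp ++ [PySem.Int.bor (kl <<< 25) (PySem.Int.bxor kh kl)]),
        ih kl (PySem.Int.bxor kh kl) ([PySem.Int.bor (kl <<< 25) (PySem.Int.bxor kh kl)])]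
    simp

theorem pvTmpLen (L : List Int) (kh kl : Int) (tmp : List Int) :
    (L.foldl pvRoundA (kh, kl, tmp)).2.2.length = tmp.length + L.length := by
  induction L generalizing kh kl tmp with
  | nil => simp
  | cons e L ih =>
    simp only [List.foldl_cons, pvRoundA_eq, ih]
    simp; omega

theorem pvRel (L : List Int) (kh kl nk : Int) :
    L.foldl (pvRoundB 0 1 1 1) (kh, kl, nk) =
      ((L.foldl pvRoundA (kh, kl, [])).1,
       (L.foldl pvRoundA (kh, kl, [])).2.1,
       (L.foldl pvRoundA (kh, kl, [])).2.2.foldl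
         (fun n v => PySem.Int.bor (n <<< 50) v) nk) := by
  induction L generalizing kh kl nk with
  | nil => simp
  | cons e L ih =>
    simp only [List.foldl_cons, pvRoundB0111, pvRoundA_eq, List.nil_append]
    rw [ih kl (PySem.Int.bxor kh kl)
          (PySem.Int.bor (nk <<< 50) (PySem.Int.bor (kl <<< 25) (PySem.Int.bxor kh kl))),
        pvTmpPrefix L kl (PySem.Int.bxor kh kl) ([PySem.Int.bor (kl <<< 25) (PySem.Int.bxor kh kl)])]
    simp

-- ===== VERDICT (by name: the statement is the Claim_ definition above) =====
theorem forward_gen_key_spec : Claim_equal_forward_gen_key := by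
  intro base_key _
  unfold Spec_forward_gen_key forward_gen_key forward_gen_key_alt
  rw [pvMatVal]
  simp only []
  rw [pvRel]
  have hlen : ((PySem.List.pyRange 0 10 1).foldl pvRoundA
      (base_key >>> 25, PySem.Int.band base_key 0x1ffffff, ([] : List Int))).2.2.length = 10 := by
    rw [pvTmpLen]; decide
  set tmp := ((PySem.List.pyRange 0 10 1).foldl pvRoundA
    (base_key >>> 25, PySem.Int.band base_key 0x1ffffff, ([] : List Int))).2.2 with htmp
  have h10 : (10 : Int) = PySem.List.len tmp := by
    simp [PySem.List.len_eq, hlen]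
  rw [h10, PySem.List.foldl_pyRange_zero_pyGetD tmp 0
    (fun n v => PySem.Int.bor (n <<< 50) v) 0]
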